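-- pv_equiv track=rewrite | github.com/benxiao/pythonit | algos/suffix_tree/csort.py | kic_index
-- ===== SOURCE A (Python) =====
-- def kic_index(array, rank):
--     assert len(array) > 0
--     l_array = len(array)
--     l_charset = max(l_array, 256) # utf-8
--     temp_array = [None] * l_array
--
--     count_array = [0] * (l_charset + 1)
--     # contruct frequency array
--     for s in array:
--         count_array[rank[s] + 1] += 1
--
--     # construct cumulative index array
--     for i in range(1, len(count_array)):
--         count_array[i] += count_array[i - 1]
--
--     # sort the array by one digit
--     # result copyed to temp_array
--     for i, s in enumerate(array):
--         temp_array[count_array[rank[s]]] = array[i]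
--         count_array[rank[s]] += 1
--
--     return temp_array
-- ===== SOURCE B (Python) =====
-- def kic_index(array, rank):
--     assert len(array) > 0
--     l_charset = max(len(array), 256)
--     buckets = [[] for _ in range(l_charset)]
--     for s in array:
--         buckets[rank[s]].append(s)
--     return [s for bucket in buckets for s in bucket]
-- ===== Notes on version B (the rewrite author's own statement) =====
-- stated objective: simpler
-- what changed: Replaces the count/cumulate/place three-pass counting sort over an index array with a single pass appending each element into per-rank buckets, then one flat concatenation of the buckets in order.
-- outside the precondition, e.g. on kic_index([0, 1], [-257, 0]): A returns [0, 1], B raises IndexError; on kic_index([0, 1], [-256, 0]): A returns [1, 0], B returns [0, 1]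
import Mathlib
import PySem

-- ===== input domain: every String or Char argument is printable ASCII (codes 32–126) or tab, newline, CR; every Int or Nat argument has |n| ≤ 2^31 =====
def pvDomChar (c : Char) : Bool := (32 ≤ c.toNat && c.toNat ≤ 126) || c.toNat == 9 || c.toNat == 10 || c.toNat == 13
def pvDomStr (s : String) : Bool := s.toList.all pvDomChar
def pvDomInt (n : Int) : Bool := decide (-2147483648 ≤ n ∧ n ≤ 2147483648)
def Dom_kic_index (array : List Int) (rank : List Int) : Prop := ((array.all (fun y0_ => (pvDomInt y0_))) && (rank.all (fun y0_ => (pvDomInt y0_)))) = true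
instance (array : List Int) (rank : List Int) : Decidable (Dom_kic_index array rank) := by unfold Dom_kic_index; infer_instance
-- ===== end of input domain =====

-- B replaces A's three-pass counting sort (frequency array, cumulative offsets, placement)
-- by one bucket-append pass plus a flat concatenation of the buckets; same return value,
-- no mutation of the input in either version (A never mutates its arguments).

-- ===== PORT A =====
-- one loop iteration of A's frequency pass: count_array[rank[s] + 1] += 1
def pvStepCountA (rank : List Int) (c : List Int) (s : Int) : List Int :=
  PySem.List.pySetD c (PySem.List.pyGetD rank s 0 + 1)
    (PySem.List.pyGetD c (PySem.List.pyGetD rank s 0 + 1) 0 + 1)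

-- one iteration of A's cumulative pass: count_array[i] += count_array[i - 1]
def pvStepCumA (c : List Int) (i : Int) : List Int :=
  PySem.List.pySetD c i (PySem.List.pyGetD c i 0 + PySem.List.pyGetD c (i - 1) 0)

-- one iteration of A's placement pass over enumerate(array)
def pvStepPlaceA (array rank : List Int) (tc : List Int × List Int) (p : Int × Int) :
    List Int × List Int :=
  (PySem.List.pySetD tc.1 (PySem.List.pyGetD tc.2 (PySem.List.pyGetD rank p.2 0) 0)
      (PySem.List.pyGetD array p.1 0),
   PySem.List.pySetD tc.2 (PySem.List.pyGetD rank p.2 0)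
      (PySem.List.pyGetD tc.2 (PySem.List.pyGetD rank p.2 0) 0 + 1))

-- Python's [None]*n placeholder list is ported as zeros: Pre_ guarantees that A's
-- placement pass overwrites every slot, so the placeholder value is never returned.
def kic_index (array : List Int) (rank : List Int) : List Int :=
  let l_array := array.length
  let l_charset := max l_array 256
  let temp_array : List Int := List.replicate l_array 0
  let count_array : List Int := List.replicate (l_charset + 1) 0
  let count1 := array.foldl (pvStepCountA rank) count_array
  let count2 := (PySem.List.pyRange 1 ((l_charset + 1 : Nat) : Int) 1).foldl pvStepCumA count1
  let final := (PySem.List.enumerate array 0).foldl (pvStepPlaceA array rank) (temp_array, count2)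
  final.1

-- ===== PORT B =====
-- one iteration of B's bucket pass: buckets[rank[s]].append(s)
def pvStepBucketB (rank : List Int) (b : List (List Int)) (s : Int) : List (List Int) :=
  PySem.List.pySetD b (PySem.List.pyGetD rank s 0)
    (PySem.List.pyGetD b (PySem.List.pyGetD rank s 0) [] ++ [s])

def kic_index_alt (array : List Int) (rank : List Int) : List Int :=
  let l_charset := max array.length 256
  let buckets := array.foldl (pvStepBucketB rank) (List.replicate l_charset ([] : List Int))
  buckets.flatten

-- ===== PRECONDITION & SPEC =====
-- Pre_ excludes the empty array (A's assert raises AssertionError) and any element whose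
-- rank lookup raises IndexError or yields a rank outside [0, max(len(array), 256)):
-- out-of-range ranks make A raise, and negative ranks hit Python's negative-index
-- wraparound corner where A's count-array arithmetic and B's buckets are both accidental
-- (A raises or returns a rotated order; B raises or buckets from the end).
def Pre_kic_index (array : List Int) (rank : List Int) : Prop :=
  array ≠ [] ∧ ∀ s ∈ array, PySem.Raise.InRange rank.length s ∧
    0 ≤ PySem.List.pyGetD rank s 0 ∧
    PySem.List.pyGetD rank s 0 < ((max array.length 256 : Nat) : Int)
instance (array : List Int) (rank : List Int) : Decidable (Pre_kic_index array rank) := by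
  unfold Pre_kic_index; infer_instance

def pvWitness_kic_index : List Int × List Int := ([2, 0, 1, 0], [7, 3, 7, 0])

def Spec_kic_index (array : List Int) (rank : List Int) (out : List Int) : Prop := out = kic_index_alt array rank
instance (array : List Int) (rank : List Int) (out : List Int) : Decidable (Spec_kic_index array rank out) := by unfold Spec_kic_index; infer_instance

-- ===== CLAIM (what is proved, stated in full; the proofs are below) =====
def Claim_equal_kic_index : Prop := ∀ (array : List Int) (rank : List Int), Dom_kic_index array rank → Pre_kic_index array rank → Spec_kic_index array rank (kic_index array rank)

-- ===== LEMMAS AND PROOFS =====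

-- the key of an element: its (nonnegative, under Pre_) rank, as a Nat
def pvKey (rank : List Int) (s : Int) : Nat := (PySem.List.pyGetD rank s 0).toNat

def pvBkt (key : Int → Nat) (k : Nat) (p : List Int) : List Int :=
  p.filter (fun s => key s = k)

def pvCnt (key : Int → Nat) (k : Nat) (p : List Int) : Nat := (pvBkt key k p).length

def pvCum (key : Int → Nat) (p : List Int) (k : Nat) : Nat :=
  ∑ j ∈ Finset.range k, pvCnt key j p

-- clean (Nat-indexed) forms of the three loop bodies, used under Pre_
def pvStep1 (key : Int → Nat) (c : List Int) (s : Int) : List Int :=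
  c.set (key s + 1) (c.getD (key s + 1) 0 + 1)

def pvStep2 (c : List Int) (j : Nat) : List Int :=
  c.set (j + 1) (c.getD (j + 1) 0 + c.getD j 0)

lemma pvGetD_set {α : Type} (l : List α) (n i : Nat) (v d : α) :
    (l.set n v).getD i d = if i = n ∧ n < l.length then v else l.getD i d := by
  simp only [List.getD_eq_getElem?_getD, List.getElem?_set]
  split_ifs with h1 h2 h3 h4 <;> simp_all

lemma pvGetD_replicate {α : Type} (n i : Nat) (a : α) :
    (List.replicate n a).getD i a = a := by
  simp only [List.getD_eq_getElem?_getD, List.getElem?_replicate]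
  split <;> simp

lemma pvBkt_append_singleton (key : Int → Nat) (k : Nat) (p : List Int) (x : Int) :
    pvBkt key k (p ++ [x]) = pvBkt key k p ++ if key x = k then [x] else [] := by
  simp only [pvBkt, List.filter_append, List.filter_cons, List.filter_nil]
  split_ifs with h <;> simp_all

lemma pvCnt_append_singleton (key : Int → Nat) (k : Nat) (p : List Int) (x : Int) :
    pvCnt key k (p ++ [x]) = pvCnt key k p + if key x = k then 1 else 0 := by
  simp only [pvCnt, pvBkt_append_singleton]
  split_ifs with h <;> simp

lemma pvCnt_append (key : Int → Nat) (k : Nat) (p q : List Int) :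
    pvCnt key k (p ++ q) = pvCnt key k p + pvCnt key k q := by
  simp [pvCnt, pvBkt, List.filter_append]

lemma pvCum_succ (key : Int → Nat) (p : List Int) (k : Nat) :
    pvCum key p (k + 1) = pvCum key p k + pvCnt key k p := by
  simp [pvCum, Finset.sum_range_succ]

lemma pvCum_mono (key : Int → Nat) (p : List Int) {k k' : Nat} (h : k ≤ k') :
    pvCum key p k ≤ pvCum key p k' := by
  apply Finset.sum_le_sum_of_subset
  intro x hx
  simp only [Finset.mem_range] at *
  omega

lemma pvCum_total (key : Int → Nat) (L : Nat) (p : List Int)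
    (hk : ∀ s ∈ p, key s < L) : pvCum key p L = p.length := by
  induction p with
  | nil => simp [pvCum, pvCnt, pvBkt]
  | cons x p ih =>
    have hx : key x < L := hk x (by simp)
    have hcnt : ∀ k, pvCnt key k (x :: p) = (if key x = k then 1 else 0) + pvCnt key k p := by
      intro k
      simp only [pvCnt, pvBkt, List.filter_cons]
      split_ifs with h <;> simp_all
      omega
    simp only [pvCum] at *
    rw [Finset.sum_congr rfl (fun k _ => hcnt k), Finset.sum_add_distrib,
      Finset.sum_ite_eq (Finset.range L) (key x) (fun _ => 1),
      if_pos (Finset.mem_range.mpr hx), ih (fun s hs => hk s (by simp [hs]))]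
    simp [Nat.add_comm]

-- frequency pass: count1[i] = number of elements with key i-1  (count1[0] = 0)
lemma pvCount1 (key : Int → Nat) (L : Nat) (p : List Int) (hk : ∀ s ∈ p, key s < L) :
    (p.foldl (pvStep1 key) (List.replicate (L + 1) 0)).length = L + 1 ∧
    ∀ i, i ≤ L → (p.foldl (pvStep1 key) (List.replicate (L + 1) 0)).getD i 0 =
      if i = 0 then 0 else ((pvCnt key (i - 1) p : Nat) : Int) := by
  induction p using List.reverseRecOn with
  | nil =>
    refine ⟨by simp, fun i hi => ?_⟩
    simp only [List.foldl_nil]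
    rw [pvGetD_replicate]
    split <;> simp [pvCnt, pvBkt]
  | append_singleton p x ih =>
    have hx : key x < L := hk x (by simp)
    obtain ⟨ihlen, ihval⟩ := ih (fun s hs => hk s (by simp [hs]))
    rw [List.foldl_append]
    refine ⟨by simpa [pvStep1] using ihlen, fun i hi => ?_⟩
    simp only [List.foldl_cons, List.foldl_nil, pvStep1]
    rw [pvGetD_set, ihlen]
    by_cases hcase : i = key x + 1
    · rw [if_pos ⟨hcase, by omega⟩, ihval (key x + 1) (by omega), if_neg (by omega), hcase]
      simp [pvCnt_append_singleton]
    · rw [if_neg (by simp [hcase]), ihval i hi]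
      rcases Nat.eq_zero_or_pos i with rfl | hpos
      · simp
      · rw [if_neg (by omega), if_neg (by omega), pvCnt_append_singleton, if_neg (by omega)]
        simp

-- cumulative pass: prefix sums, sequentially from the left
lemma pvCum2 (L : Nat) (c : List Int) (hc : c.length = L + 1) :
    ∀ m, m ≤ L →
    ((List.range m).foldl pvStep2 c).length = L + 1 ∧
    ∀ i, i ≤ L → ((List.range m).foldl pvStep2 c).getD i 0 =
      if i ≤ m then ∑ j ∈ Finset.range (i + 1), c.getD j 0 else c.getD i 0 := by
  intro m
  induction m with
  | zero =>
    refine fun _ => ⟨hc, fun i hi => ?_⟩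
    rcases Nat.eq_zero_or_pos i with rfl | hpos
    · simp
    · simp [Nat.pos_iff_ne_zero.mp hpos]
  | succ m ihm =>
    intro hm
    obtain ⟨ihlen, ihval⟩ := ihm (by omega)
    rw [List.range_succ, List.foldl_append]
    refine ⟨by simpa [pvStep2] using ihlen, fun i hi => ?_⟩
    simp only [List.foldl_cons, List.foldl_nil, pvStep2]
    rw [pvGetD_set, ihlen]
    by_cases hcase : i = m + 1
    · rw [if_pos ⟨hcase, by omega⟩, ihval (m + 1) (by omega), ihval m (by omega), if_neg (by omega),
        if_pos (le_refl m), hcase, if_pos (le_refl (m + 1))]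
      conv_rhs => rw [Finset.sum_range_succ]
      ring
    · rw [if_neg (by simp [hcase]), ihval i hi]
      rcases Nat.lt_or_ge i (m + 1) with hlt | hge
      · rw [if_pos (by omega), if_pos (by omega)]
      · rw [if_neg (by omega), if_neg (by omega)]

-- A's count fold equals the clean Nat fold, under Pre_
lemma pvCountA_eq (rank : List Int) (p : List Int) (c : List Int)
    (hk : ∀ s ∈ p, 0 ≤ PySem.List.pyGetD rank s 0) :
    p.foldl (pvStepCountA rank) c = p.foldl (pvStep1 (pvKey rank)) c := by
  induction p generalizing c with
  | nil => rfl
  | cons s p ih =>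
    have h0 : 0 ≤ PySem.List.pyGetD rank s 0 := hk s (by simp)
    have hcast : PySem.List.pyGetD rank s 0 = ((pvKey rank s : Nat) : Int) :=
      (Int.toNat_of_nonneg h0).symm
    have hstep : pvStepCountA rank c s = pvStep1 (pvKey rank) c s := by
      unfold pvStepCountA pvStep1
      rw [hcast, show ((pvKey rank s : Nat) : Int) + 1 = ((pvKey rank s + 1 : Nat) : Int) by push_cast; ring,
        PySem.List.pySetD_natCast, PySem.List.pyGetD_natCast]
    simp only [List.foldl_cons, hstep]
    exact ih _ (fun t ht => hk t (by simp [ht]))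

-- A's cumulative fold over range(1, L+1) equals the clean Nat fold over range L
lemma pvCumA_eq (L : Nat) (c : List Int) :
    (PySem.List.pyRange 1 ((L + 1 : Nat) : Int) 1).foldl pvStepCumA c =
    (List.range L).foldl pvStep2 c := by
  rw [PySem.List.pyRange_one, show ((((L + 1 : Nat) : Int)) - 1).toNat = L by omega,
    List.foldl_map]
  have hstep : ∀ (c : List Int) (k : Nat), pvStepCumA c (1 + (k : Int)) = pvStep2 c k := by
    intro c k
    unfold pvStepCumA pvStep2
    rw [show (1 : Int) + (k : Int) = ((k + 1 : Nat) : Int) by push_cast; ring,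
      PySem.List.pySetD_natCast, PySem.List.pyGetD_natCast,
      show (((k + 1 : Nat) : Int)) - 1 = ((k : Nat) : Int) by push_cast; ring,
      PySem.List.pyGetD_natCast]
  simp only [hstep]

lemma pvGetD_append_left {α : Type} (l l' : List α) (i : Nat) (h : i < l.length) (d : α) :
    (l ++ l').getD i d = l.getD i d := by
  rw [List.getD_eq_getElem?_getD, List.getD_eq_getElem?_getD, List.getElem?_append_left h]

lemma pvGetD_append_self {α : Type} (l : List α) (x d : α) :
    (l ++ [x]).getD l.length d = x := by
  rw [List.getD_eq_getElem?_getD, List.getElem?_append_right (le_refl _)]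
  simp

-- main invariant of A's placement pass
lemma pvPlace (array rank : List Int) (n L : Nat)
    (hn : array.length = n) (_hnL : n ≤ L)
    (hk : ∀ s ∈ array, 0 ≤ PySem.List.pyGetD rank s 0 ∧ pvKey rank s < L) :
    ∀ (q p temp c : List Int),
    array = p ++ q → temp.length = n → c.length = L + 1 →
    (∀ k, k ≤ L → c.getD k 0 =
      ((pvCum (pvKey rank) array k + pvCnt (pvKey rank) k p : Nat) : Int)) →
    (∀ k, k < L → ∀ j, j < pvCnt (pvKey rank) k p →
      temp.getD (pvCum (pvKey rank) array k + j) 0 = (pvBkt (pvKey rank) k p).getD j 0) →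
    ((PySem.List.enumerate q (p.length : Int)).foldl (pvStepPlaceA array rank) (temp, c)).1.length = n ∧
    (∀ k, k < L → ∀ j, j < pvCnt (pvKey rank) k array →
      ((PySem.List.enumerate q (p.length : Int)).foldl (pvStepPlaceA array rank) (temp, c)).1.getD
        (pvCum (pvKey rank) array k + j) 0 = (pvBkt (pvKey rank) k array).getD j 0) := by
  intro q
  induction q with
  | nil =>
    intro p temp c harr htl hcl hc ht
    rw [List.append_nil] at harr
    subst harr
    exact ⟨htl, fun k hkL j hj => ht k hkL j hj⟩
  | cons s q' ih =>
    intro p temp c harr htl hcl hc ht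
    have hs_mem : s ∈ array := by rw [harr]; simp
    obtain ⟨hr0, hrL⟩ := hk s hs_mem
    have hcast : PySem.List.pyGetD rank s 0 = ((pvKey rank s : Nat) : Int) :=
      (Int.toNat_of_nonneg hr0).symm
    have hsplit : ∀ k, pvCnt (pvKey rank) k array =
        pvCnt (pvKey rank) k p + pvCnt (pvKey rank) k (s :: q') := by
      intro k; rw [harr, pvCnt_append]
    have hone : 1 ≤ pvCnt (pvKey rank) (pvKey rank s) (s :: q') := by
      simp [pvCnt, pvBkt]
    have hcntlt : pvCnt (pvKey rank) (pvKey rank s) p <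
        pvCnt (pvKey rank) (pvKey rank s) array := by
      have := hsplit (pvKey rank s); omega
    have htotal : pvCum (pvKey rank) array L = n := by
      rw [pvCum_total (pvKey rank) L array (fun t htm => (hk t htm).2), hn]
    have hsucc : pvCum (pvKey rank) array (pvKey rank s) +
        pvCnt (pvKey rank) (pvKey rank s) array =
        pvCum (pvKey rank) array (pvKey rank s + 1) := (pvCum_succ _ _ _).symm
    have hPlt : pvCum (pvKey rank) array (pvKey rank s) +
        pvCnt (pvKey rank) (pvKey rank s) p < n := by
      have h2 : pvCum (pvKey rank) array (pvKey rank s + 1) ≤ pvCum (pvKey rank) array L :=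
        pvCum_mono _ _ (by omega)
      omega
    have hval : PySem.List.pyGetD array ((p.length : Nat) : Int) 0 = s := by
      rw [PySem.List.pyGetD_natCast, harr, List.getD_eq_getElem?_getD,
        List.getElem?_append_right (le_refl p.length)]
      simp
    have hpos : PySem.List.pyGetD c ((pvKey rank s : Nat) : Int) 0 =
        ((pvCum (pvKey rank) array (pvKey rank s) +
          pvCnt (pvKey rank) (pvKey rank s) p : Nat) : Int) := by
      rw [PySem.List.pyGetD_natCast, hc (pvKey rank s) (by omega)]
    have hstep : pvStepPlaceA array rank (temp, c) (((p.length : Nat) : Int), s) =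
        (temp.set (pvCum (pvKey rank) array (pvKey rank s) +
            pvCnt (pvKey rank) (pvKey rank s) p) s,
         c.set (pvKey rank s) ((pvCum (pvKey rank) array (pvKey rank s) +
            pvCnt (pvKey rank) (pvKey rank s) p + 1 : Nat) : Int)) := by
      unfold pvStepPlaceA
      simp only [hcast, hval, hpos]
      rw [show (((pvCum (pvKey rank) array (pvKey rank s) +
          pvCnt (pvKey rank) (pvKey rank s) p : Nat)) : Int) + 1 =
        ((pvCum (pvKey rank) array (pvKey rank s) +
          pvCnt (pvKey rank) (pvKey rank s) p + 1 : Nat) : Int) by push_cast; ring,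
        PySem.List.pySetD_natCast, PySem.List.pySetD_natCast]
    rw [PySem.List.enumerate_cons, List.foldl_cons, hstep,
      show (p.length : Int) + 1 = (((p ++ [s]).length : Nat) : Int) by simp]
    have harr' : array = (p ++ [s]) ++ q' := by rw [harr]; simp
    apply ih (p ++ [s]) _ _ harr'
    · simpa using htl
    · simpa using hcl
    · -- count invariant
      intro k hkL
      rw [pvGetD_set]
      by_cases hkk : k = pvKey rank s
      · subst hkk
        rw [if_pos ⟨rfl, by omega⟩, pvCnt_append_singleton, if_pos rfl]
        push_cast
        ring
      · rw [if_neg (fun hcontra => hkk hcontra.1), hc k hkL, pvCnt_append_singleton,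
          if_neg (fun hcontra => hkk hcontra.symm)]
        norm_num
    · -- temp invariant
      intro k hkL j hj
      have hPlen : pvCum (pvKey rank) array (pvKey rank s) +
          pvCnt (pvKey rank) (pvKey rank s) p < temp.length := by omega
      rw [pvGetD_set]
      by_cases hkk : k = pvKey rank s
      · subst hkk
        have hcntA : pvCnt (pvKey rank) (pvKey rank s) (p ++ [s]) =
            pvCnt (pvKey rank) (pvKey rank s) p + 1 := by
          rw [pvCnt_append_singleton, if_pos rfl]
        rcases Nat.lt_or_ge j (pvCnt (pvKey rank) (pvKey rank s) p) with hjlt | hjge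
        · rw [if_neg (fun hcontra => by omega : ¬(pvCum (pvKey rank) array (pvKey rank s) + j =
              pvCum (pvKey rank) array (pvKey rank s) + pvCnt (pvKey rank) (pvKey rank s) p ∧
              pvCum (pvKey rank) array (pvKey rank s) + pvCnt (pvKey rank) (pvKey rank s) p <
                temp.length)),
            ht (pvKey rank s) hkL j hjlt, pvBkt_append_singleton, if_pos rfl,
            pvGetD_append_left _ _ j hjlt]
        · have hjeq : j = pvCnt (pvKey rank) (pvKey rank s) p := by
            rw [hcntA] at hj; omega
          rw [if_pos ⟨by omega, hPlen⟩, pvBkt_append_singleton, if_pos rfl, hjeq,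
            show pvCnt (pvKey rank) (pvKey rank s) p =
              (pvBkt (pvKey rank) (pvKey rank s) p).length from rfl,
            pvGetD_append_self]
      · have hcnt' : pvCnt (pvKey rank) k (p ++ [s]) = pvCnt (pvKey rank) k p := by
          rw [pvCnt_append_singleton, if_neg (fun hcontra => hkk hcontra.symm)]
          omega
        have hjlt : j < pvCnt (pvKey rank) k p := by rw [hcnt'] at hj; exact hj
        have hcntle : pvCnt (pvKey rank) k p ≤ pvCnt (pvKey rank) k array := by
          have := hsplit k; omega
        have hne : pvCum (pvKey rank) array k + j ≠
            pvCum (pvKey rank) array (pvKey rank s) +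
            pvCnt (pvKey rank) (pvKey rank s) p := by
          rcases Nat.lt_or_ge k (pvKey rank s) with hlt | hge
          · have h1 : pvCum (pvKey rank) array k + pvCnt (pvKey rank) k array =
                pvCum (pvKey rank) array (k + 1) := (pvCum_succ _ _ _).symm
            have h2 : pvCum (pvKey rank) array (k + 1) ≤
                pvCum (pvKey rank) array (pvKey rank s) := pvCum_mono _ _ (by omega)
            omega
          · have h1 : pvCum (pvKey rank) array (pvKey rank s + 1) ≤
                pvCum (pvKey rank) array k := pvCum_mono _ _ (by omega)
            omega
        rw [if_neg (fun hcontra => hne hcontra.1), ht k hkL j hjlt, pvBkt_append_singleton,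
          if_neg (fun hcontra => hkk hcontra.symm), List.append_nil]

lemma pvGetD_map_range {α : Type} (L k : Nat) (hk : k < L) (f : Nat → α) (d : α) :
    ((List.range L).map f).getD k d = f k := by
  simp [List.getD_eq_getElem?_getD, List.getElem?_range hk]

lemma pvSet_map_range {α : Type} (L k : Nat) (hk : k < L) (f : Nat → α) (v : α) :
    ((List.range L).map f).set k v = (List.range L).map (fun j => if j = k then v else f j) := by
  apply List.ext_getElem (by simp)
  intro i h1 h2
  simp only [List.getElem_set, List.getElem_map, List.getElem_range]
  simp only [List.length_set, List.length_map, List.length_range] at h1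
  rcases eq_or_ne i k with rfl | hne
  · simp
  · simp [hne, Ne.symm hne]

-- B's bucket fold builds exactly the per-key filters
lemma pvBuckets (rank : List Int) (L : Nat) (p : List Int)
    (hk : ∀ s ∈ p, 0 ≤ PySem.List.pyGetD rank s 0 ∧ pvKey rank s < L) :
    p.foldl (pvStepBucketB rank) (List.replicate L ([] : List Int)) =
    (List.range L).map (fun k => pvBkt (pvKey rank) k p) := by
  induction p using List.reverseRecOn with
  | nil =>
    rw [show ((List.range L).map fun k => pvBkt (pvKey rank) k ([] : List Int)) =
        (List.range L).map (fun _ => ([] : List Int)) from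
      List.map_congr_left (fun k _ => by simp [pvBkt]), List.map_const']
    simp
  | append_singleton p x ih =>
    obtain ⟨hx0, hxL⟩ := hk x (by simp)
    have hcast : PySem.List.pyGetD rank x 0 = ((pvKey rank x : Nat) : Int) :=
      (Int.toNat_of_nonneg hx0).symm
    rw [List.foldl_append, ih (fun s hs => hk s (by simp [hs]))]
    simp only [List.foldl_cons, List.foldl_nil, pvStepBucketB]
    rw [hcast, PySem.List.pySetD_natCast, PySem.List.pyGetD_natCast,
      pvGetD_map_range L _ hxL, pvSet_map_range L _ hxL]
    apply List.map_congr_left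
    intro k hkmem
    rw [pvBkt_append_singleton]
    rcases eq_or_ne k (pvKey rank x) with rfl | hne
    · simp
    · simp [hne, Ne.symm hne]

-- assembling: a list whose intervals [cum k, cum (k+1)) hold the buckets is their flat concat
lemma pvFlatten (key : Int → Nat) (array temp : List Int) (L : Nat)
    (hlen : temp.length = array.length)
    (hk : ∀ s ∈ array, key s < L)
    (ht : ∀ k, k < L → ∀ j, j < pvCnt key k array →
      temp.getD (pvCum key array k + j) 0 = (pvBkt key k array).getD j 0) :
    ((List.range L).map (fun k => pvBkt key k array)).flatten = temp := by
  have htot : pvCum key array L = array.length := pvCum_total key L array hk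
  have haux : ∀ k, k ≤ L →
      ((List.range k).map (fun j => pvBkt key j array)).flatten = temp.take (pvCum key array k) := by
    intro k
    induction k with
    | zero => simp [pvCum]
    | succ k ihk =>
      intro hk1
      have hk0 : k < L := by omega
      have hbound : pvCum key array k + pvCnt key k array ≤ array.length := by
        rw [← pvCum_succ, ← htot]
        exact pvCum_mono key array hk1
      rw [List.range_succ, List.map_append, List.flatten_append, ihk (by omega), pvCum_succ,
        List.take_add]
      have hseg : List.take (pvCnt key k array) (List.drop (pvCum key array k) temp) =
          pvBkt key k array := by
        apply List.ext_getElem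
        · simp only [List.length_take, List.length_drop, hlen]
          have : pvCnt key k array = (pvBkt key k array).length := rfl
          omega
        · intro i h1 h2
          rw [List.getElem_take, List.getElem_drop]
          have hilt : i < pvCnt key k array := by
            simp only [List.length_take] at h1; omega
          have hidx : pvCum key array k + i < temp.length := by
            rw [hlen]; omega
          calc temp[pvCum key array k + i] = temp.getD (pvCum key array k + i) 0 := by
                rw [List.getD_eq_getElem?_getD, List.getElem?_eq_getElem hidx]; rfl
            _ = (pvBkt key k array).getD i 0 := ht k hk0 i hilt
            _ = (pvBkt key k array)[i] := by
                rw [List.getD_eq_getElem?_getD, List.getElem?_eq_getElem h2]; rfl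
      simp [hseg]
  rw [show ((List.range L).map fun k => pvBkt key k array) =
      ((List.range L).map fun j => pvBkt key j array) from rfl, haux L (le_refl L), htot,
    ← hlen, List.take_length]

lemma pvSumShift (key : Int → Nat) (p : List Int) (i : Nat) :
    (∑ j ∈ Finset.range (i + 1), if j = 0 then (0 : Int)
      else ((pvCnt key (j - 1) p : Nat) : Int)) = ((pvCum key p i : Nat) : Int) := by
  induction i with
  | zero => simp [pvCum]
  | succ i ih =>
    rw [Finset.sum_range_succ, ih, if_neg (by omega), pvCum_succ]
    push_cast
    ring

-- ===== VERDICT (by name: the statement is the Claim_ definition above) =====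
theorem kic_index_spec : Claim_equal_kic_index := by
  intro array rank _hdom hpre
  obtain ⟨hne0, hall⟩ := hpre
  unfold Spec_kic_index
  simp only [kic_index, kic_index_alt]
  have hk2 : ∀ s ∈ array, 0 ≤ PySem.List.pyGetD rank s 0 ∧
      pvKey rank s < max array.length 256 := by
    intro s hs
    obtain ⟨-, h0, hlt⟩ := hall s hs
    exact ⟨h0, by unfold pvKey; omega⟩
  rw [pvCountA_eq rank array _ (fun s hs => (hk2 s hs).1), pvCumA_eq]
  obtain ⟨h1len, h1val⟩ :=
    pvCount1 (pvKey rank) (max array.length 256) array (fun s hs => (hk2 s hs).2)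
  obtain ⟨h2len, h2val⟩ :=
    pvCum2 (max array.length 256) _ h1len (max array.length 256) (le_refl _)
  have hc2 : ∀ i, i ≤ max array.length 256 →
      ((List.range (max array.length 256)).foldl pvStep2
        (array.foldl (pvStep1 (pvKey rank))
          (List.replicate (max array.length 256 + 1) 0))).getD i 0 =
      ((pvCum (pvKey rank) array i + pvCnt (pvKey rank) i ([] : List Int) : Nat) : Int) := by
    intro i hi
    rw [h2val i hi, if_pos hi,
      Finset.sum_congr rfl (fun j hj => h1val j (by simp at hj; omega)), pvSumShift]
    simp [pvCnt, pvBkt]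
  obtain ⟨hAlen, hAval⟩ := pvPlace array rank array.length (max array.length 256) rfl
    (le_max_left _ _) hk2 array [] (List.replicate array.length 0) _ (by simp) (by simp)
    h2len hc2 (fun k hkL j hj => absurd hj (by simp [pvCnt, pvBkt]))
  rw [pvBuckets rank (max array.length 256) array hk2]
  exact (pvFlatten (pvKey rank) array _ (max array.length 256) hAlen
    (fun s hs => (hk2 s hs).2) hAval).symm
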